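-- pv_equiv track=rewrite | github.com/swang2000/DP | waystoscore.py | count
-- ===== SOURCE A (Python) =====
-- def count(n):
--     # // table[i] will store count of solutions for
--     # // value i.
--     table = [0]*(n+1)
--
--     #// Base case (If given value is 0)
--     table[0] = 1
--
--     # // One by one consider given 3 moves and update the table[]
--     # // values after the index greater than or equal to the
--     # // value of the picked move
--     for i in range(3, n+1):
--        table[i] += table[i-3]
--     for i in range(5, n+1):
--        table[i] += table[i-5]
--     for i in range(10, n+1):
--        table[i] += table[i-10]
--
--     return table[n]
-- ===== SOURCE B (Python) =====
-- def count(n):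
--     # enumerate the number c of 10-coins; for each remainder r count the b with
--     # 5*b <= r and 3 | (r - 5*b) in closed form: b must be congruent to 2*r mod 3
--     total = 0
--     for c in range(n // 10 + 1):
--         r = n - 10 * c
--         m = r // 5
--         t = (2 * r) % 3
--         if t <= m:
--             total += (m - t) // 3 + 1
--     return total
-- ===== Notes on version B (the rewrite author's own statement) =====
-- stated objective: faster
-- what changed: Replaces the three in-place DP passes over a length-(n+1) table by a single loop over the number of 10-coins with a closed-form count of the valid 5-coin multiplicities (a congruence condition), using O(1) memory instead of O(n).
import Mathlib
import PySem

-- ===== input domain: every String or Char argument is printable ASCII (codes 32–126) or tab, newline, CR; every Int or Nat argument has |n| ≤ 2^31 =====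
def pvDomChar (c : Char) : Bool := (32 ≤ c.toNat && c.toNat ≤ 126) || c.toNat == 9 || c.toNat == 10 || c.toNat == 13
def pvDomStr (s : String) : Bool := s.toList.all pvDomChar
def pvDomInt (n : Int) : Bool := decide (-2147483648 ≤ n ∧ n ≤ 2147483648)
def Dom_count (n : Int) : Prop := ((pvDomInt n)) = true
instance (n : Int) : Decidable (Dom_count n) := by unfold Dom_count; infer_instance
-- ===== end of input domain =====

-- B replaces A's three in-place DP passes over a length-(n+1) table by a single loop over
-- the number of 10-coins with a closed-form count of the valid 5-coin multiplicities (faster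
-- by a constant factor, O(1) memory). Pre_ excludes n < 0, where A raises IndexError.


-- ===== PORT A =====
-- 'for i in range(c, n+1): table[i] += table[i-c]' — in-place pass, i runs up to len(table)
-- (the Python list is a mutable array: Array Int, updated in place)
def countLoop (c : Nat) (i : Nat) (t : Array Int) : Array Int :=
  if h : i < t.size then
    countLoop c (i + 1) (t.set i (t.getD i 0 + t.getD (i - c) 0) h)
  else t
termination_by t.size - i
decreasing_by simp only [Array.size_set]; omega

def count (n : Int) : Int :=
  let table := (Array.replicate ((n + 1).toNat) (0 : Int)).setIfInBounds 0 1
  let table := countLoop 3 3 table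
  let table := countLoop 5 5 table
  let table := countLoop 10 10 table
  table.getD n.toNat 0

-- ===== PORT B =====
def count_alt (n : Int) : Int :=
  (PySem.List.pyRange 0 (PySem.Int.floordiv n 10 + 1) 1).foldl (fun total c =>
    let r := n - 10 * c
    let m := PySem.Int.floordiv r 5
    let t := PySem.Int.mod (2 * r) 3
    if t ≤ m then total + (PySem.Int.floordiv (m - t) 3 + 1) else total) 0

-- ===== PRECONDITION & SPEC =====
-- A raises IndexError for n < 0 ('table[0] = 1' on the empty list); Pre_ excludes exactly those inputs.
def Pre_count (n : Int) : Prop := 0 ≤ n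
instance (n : Int) : Decidable (Pre_count n) := by unfold Pre_count; infer_instance
def pvWitness_count : Int := 10

def Spec_count (n : Int) (out : Int) : Prop := out = count_alt n
instance (n : Int) (out : Int) : Decidable (Spec_count n out) := by unfold Spec_count; infer_instance

-- ===== CLAIM (what is proved, stated in full; the proofs are below) =====
def Claim_equal_count : Prop := ∀ (n : Int), Dom_count n → Pre_count n → Spec_count n (count n)

-- ===== LEMMAS AND PROOFS =====

/-- initial table contents -/
def delta0 : Nat → Int := fun j => if j = 0 then 1 else 0

/-- the value of position j after one in-place pass with coin c over contents g -/
def Hrec (g : Nat → Int) (c : Nat) : Nat → Int := fun j =>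
  g j + if _h : 0 < c ∧ c ≤ j then Hrec g c (j - c) else 0
termination_by j => j
decreasing_by omega

lemma Hrec_eq (g : Nat → Int) (c j : Nat) :
    Hrec g c j = g j + if 0 < c ∧ c ≤ j then Hrec g c (j - c) else 0 := by
  rw [Hrec]; split <;> simp_all

lemma countLoop_size (c i : Nat) (t : Array Int) :
    (countLoop c i t).size = t.size := by
  fun_induction countLoop c i t with
  | case1 i t h ih => rw [ih]; simp
  | case2 => rfl

lemma agetD_set (t : Array Int) (i j : Nat) (v : Int) (h : i < t.size) :
    (t.set i v h).getD j 0 = if j = i then v else t.getD j 0 := by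
  rw [Array.getD_eq_getD_getElem?, Array.getD_eq_getD_getElem?, Array.getElem?_set h]
  split_ifs with h1 h2 h2
  · rfl
  · exact absurd h1.symm h2
  · exact absurd h2.symm h1
  · rfl

lemma agetD_setIfInBounds (t : Array Int) (i j : Nat) (v : Int) (hi : i < t.size) :
    (t.setIfInBounds i v).getD j 0 = if j = i then v else t.getD j 0 := by
  rw [Array.setIfInBounds, dif_pos hi]
  exact agetD_set t i j v hi

lemma agetD_replicate (N j : Nat) : (Array.replicate N (0 : Int)).getD j 0 = 0 := by
  rw [Array.getD_eq_getD_getElem?]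
  by_cases hj : j < N <;> simp [hj]

lemma countLoop_spec (c : Nat) (hc : 0 < c) (g : Nat → Int) :
    ∀ (fuel i : Nat) (t : Array Int), t.size - i = fuel → c ≤ i →
    (∀ j, j < i → t.getD j 0 = Hrec g c j) →
    (∀ j, i ≤ j → t.getD j 0 = g j) →
    ∀ j, j < t.size → (countLoop c i t).getD j 0 = Hrec g c j := by
  intro fuel
  induction fuel with
  | zero =>
    intro i t hfuel hci h1 h2 j hj
    rw [countLoop, dif_neg (by omega)]
    exact h1 j (by omega)
  | succ k ih =>
    intro i t hfuel hci h1 h2 j hj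
    have hi : i < t.size := by omega
    rw [countLoop, dif_pos hi]
    set v := t.getD i 0 + t.getD (i - c) 0 with hv
    have h1' : ∀ j', j' < i + 1 → (t.set i v hi).getD j' 0 = Hrec g c j' := by
      intro j' hj'
      rw [agetD_set t i j' v hi]
      by_cases hji : j' = i
      · rw [if_pos hji, hv, hji, h2 i le_rfl, h1 (i - c) (by omega), Hrec_eq g c i,
          if_pos ⟨hc, hci⟩]
      · rw [if_neg hji]; exact h1 j' (by omega)
    have h2' : ∀ j', i + 1 ≤ j' → (t.set i v hi).getD j' 0 = g j' := by
      intro j' hj'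
      rw [agetD_set t i j' v hi, if_neg (by omega)]
      exact h2 j' (by omega)
    exact ih (i + 1) (t.set i v hi) (by rw [Array.size_set]; omega) (by omega) h1' h2'
      j (by rw [Array.size_set]; exact hj)

lemma countLoop_run (c : Nat) (hc : 0 < c) (t : Array Int) :
    ∀ j, j < t.size → (countLoop c c t).getD j 0 = Hrec (fun j => t.getD j 0) c j := by
  intro j hj
  refine countLoop_spec c hc (fun j => t.getD j 0) (t.size - c) c t rfl le_rfl ?_
    (fun _ _ => rfl) j hj
  intro j' hj'
  rw [Hrec_eq, if_neg (by omega)]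
  ring

lemma Hrec_congr (g g' : Nat → Int) (c N : Nat) (hg : ∀ j, j < N → g j = g' j) :
    ∀ j, j < N → Hrec g c j = Hrec g' c j := by
  intro j
  induction j using Nat.strong_induction_on with
  | _ j ih =>
    intro hj
    rw [Hrec_eq g c j, Hrec_eq g' c j, hg j hj]
    split_ifs with h
    · rw [ih (j - c) (by omega) (by omega)]
    · rfl

/-- the full DP value: ways to write j as 3a+5b+10c -/
def W : Nat → Int := Hrec (Hrec (Hrec delta0 3) 5) 10

lemma count_eq_W (n : Int) (hn : 0 ≤ n) : count n = W n.toNat := by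
  set N := (n + 1).toNat with hNdef
  set t1 := (Array.replicate N (0 : Int)).setIfInBounds 0 1 with ht1
  have hlen1 : t1.size = N := by simp [ht1]
  have hval1 : ∀ j, j < N → t1.getD j 0 = delta0 j := by
    intro j hj
    rw [ht1, agetD_setIfInBounds _ 0 j 1 (by simp; omega)]
    by_cases hj0 : j = 0
    · rw [if_pos hj0]; simp [delta0, hj0]
    · rw [if_neg hj0, agetD_replicate]
      simp [delta0, hj0]
  set t2 := countLoop 3 3 t1 with ht2
  have hlen2 : t2.size = N := by rw [ht2, countLoop_size, hlen1]
  have hval2 : ∀ j, j < N → t2.getD j 0 = Hrec delta0 3 j := by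
    intro j hj
    rw [ht2, countLoop_run 3 (by omega) t1 j (by omega)]
    exact Hrec_congr _ _ 3 N hval1 j hj
  set t3 := countLoop 5 5 t2 with ht3
  have hlen3 : t3.size = N := by rw [ht3, countLoop_size, hlen2]
  have hval3 : ∀ j, j < N → t3.getD j 0 = Hrec (Hrec delta0 3) 5 j := by
    intro j hj
    rw [ht3, countLoop_run 5 (by omega) t2 j (by omega)]
    exact Hrec_congr _ _ 5 N hval2 j hj
  have hval4 : ∀ j, j < N → (countLoop 10 10 t3).getD j 0 = W j := by
    intro j hj
    rw [countLoop_run 10 (by omega) t3 j (by omega)]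
    exact Hrec_congr _ _ 10 N hval3 j hj
  show (countLoop 10 10 t3).getD n.toNat 0 = W n.toNat
  exact hval4 n.toNat (by omega)

/-- ways with coin 3 only -/
lemma W3_eq : ∀ j, Hrec delta0 3 j = if j % 3 = 0 then 1 else 0 := by
  intro j
  induction j using Nat.strong_induction_on with
  | _ j ih =>
    rw [Hrec_eq]
    by_cases h3 : 3 ≤ j
    · rw [if_pos (by omega : 0 < 3 ∧ 3 ≤ j), ih (j - 3) (by omega)]
      have hd : delta0 j = 0 := by unfold delta0; rw [if_neg (by omega)]
      have hm : (j - 3) % 3 = j % 3 := by omega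
      rw [hd, hm]; ring
    · rw [if_neg (show ¬(0 < 3 ∧ 3 ≤ j) by omega)]
      unfold delta0
      split_ifs <;> omega

/-- closed form for the number of b ≤ r/5 with 3 ∣ r - 5b -/
def W35closed (r : Nat) : Int :=
  if (2 * r) % 3 ≤ r / 5 then ((r / 5 - (2 * r) % 3) / 3 + 1 : Nat) else 0

lemma cnt_step (q t : Nat) (hq1 : 1 ≤ q) (ht : t < 3) :
    (if t = 0 then (1 : Int) else 0) +
      (if (t + 2) % 3 ≤ q - 1 then (((q - 1 - (t + 2) % 3) / 3 + 1 : Nat) : Int) else 0) =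
    if t ≤ q then (((q - t) / 3 + 1 : Nat) : Int) else 0 := by
  interval_cases t <;>
    simp only [Nat.reduceMod, Nat.reduceAdd, Nat.sub_zero, Nat.sub_sub] <;>
    split_ifs <;> (try contradiction) <;> push_cast <;> omega

lemma W35_eq : ∀ r, Hrec (Hrec delta0 3) 5 r = W35closed r := by
  intro r
  induction r using Nat.strong_induction_on with
  | _ r ih =>
    rw [Hrec_eq, W3_eq]
    by_cases h5 : 5 ≤ r
    · rw [if_pos (by omega : 0 < 5 ∧ 5 ≤ r), ih (r - 5) (by omega)]
      unfold W35closed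
      have hq : (r - 5) / 5 = r / 5 - 1 := by omega
      have hq1 : 1 ≤ r / 5 := by omega
      have ht' : (2 * (r - 5)) % 3 = ((2 * r) % 3 + 2) % 3 := by omega
      have hind : (r % 3 = 0) ↔ ((2 * r) % 3 = 0) := by omega
      have ht3 : (2 * r) % 3 < 3 := by omega
      rw [hq, ht']
      have hind2 : (if r % 3 = 0 then (1 : Int) else 0) =
          (if (2 * r) % 3 = 0 then 1 else 0) := by
        split_ifs <;> omega
      rw [hind2]
      exact cnt_step (r / 5) ((2 * r) % 3) hq1 ht3
    · rw [if_neg (show ¬(0 < 5 ∧ 5 ≤ r) by omega)]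
      unfold W35closed
      interval_cases r <;> norm_num [W35closed]

lemma Hrec_sum (g : Nat → Int) (c : Nat) (hc : 0 < c) :
    ∀ j, Hrec g c j = ((List.range (j / c + 1)).map (fun k => g (j - c * k))).sum := by
  intro j
  induction j using Nat.strong_induction_on with
  | _ j ih =>
    rw [Hrec_eq]
    by_cases hcj : c ≤ j
    · rw [if_pos ⟨hc, hcj⟩, ih (j - c) (by omega)]
      have hdiv : (j - c) / c + 1 = j / c := (Nat.div_eq_sub_div hc hcj).symm
      rw [hdiv, List.range_succ_eq_map]
      simp only [List.map_cons, List.sum_cons, Nat.mul_zero, Nat.sub_zero, List.map_map]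
      congr 1
      refine congrArg List.sum (List.map_congr_left ?_)
      intro k _
      simp only [Function.comp_apply, Nat.succ_eq_add_one]
      congr 1
      have hck : c * (k + 1) = c * k + c := by ring
      rw [hck]
      omega
    · rw [if_neg (by omega), Nat.div_eq_of_lt (by omega)]
      simp

lemma closed_cast (r : Nat) :
    (if PySem.Int.mod (2 * (r : Int)) 3 ≤ PySem.Int.floordiv (r : Int) 5 then
        PySem.Int.floordiv (PySem.Int.floordiv (r : Int) 5 -
          PySem.Int.mod (2 * (r : Int)) 3) 3 + 1
      else 0) = W35closed r := by
  rw [PySem.Int.mod_eq_emod_of_pos (by omega), PySem.Int.floordiv_eq_ediv_of_pos (by omega)]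
  have h1 : ((r : Int)) / 5 = ((r / 5 : Nat) : Int) := by omega
  have h2 : (2 * (r : Int)) % 3 = (((2 * r) % 3 : Nat) : Int) := by omega
  rw [h1, h2]
  unfold W35closed
  by_cases hc : (2 * r) % 3 ≤ r / 5
  · rw [if_pos (by exact_mod_cast hc), if_pos hc]
    have h3 : ((r / 5 : Nat) : Int) - (((2 * r) % 3 : Nat) : Int) =
        ((r / 5 - (2 * r) % 3 : Nat) : Int) := by omega
    rw [h3, PySem.Int.floordiv_eq_ediv_of_pos (by omega)]
    have h4 : ((r / 5 - (2 * r) % 3 : Nat) : Int) / 3 =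
        (((r / 5 - (2 * r) % 3) / 3 : Nat) : Int) := by omega
    rw [h4]
    push_cast
    omega
  · rw [if_neg (by exact_mod_cast hc), if_neg hc]

lemma count_alt_eq_W (n : Int) (hn : 0 ≤ n) : count_alt n = W n.toNat := by
  unfold count_alt
  have hbody : (fun (total c : Int) =>
      let r := n - 10 * c
      let m := PySem.Int.floordiv r 5
      let t := PySem.Int.mod (2 * r) 3
      if t ≤ m then total + (PySem.Int.floordiv (m - t) 3 + 1) else total) =
      (fun (total c : Int) => total + (fun c : Int =>
        if PySem.Int.mod (2 * (n - 10 * c)) 3 ≤ PySem.Int.floordiv (n - 10 * c) 5 then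
          (PySem.Int.floordiv (PySem.Int.floordiv (n - 10 * c) 5 -
            PySem.Int.mod (2 * (n - 10 * c)) 3) 3 + 1) else 0) c) := by
    funext total c
    simp only []
    split_ifs <;> ring
  rw [hbody, PySem.List.foldl_add]
  rw [W, Hrec_sum _ 10 (by omega)]
  have hfd : PySem.Int.floordiv n 10 + 1 = ((n.toNat / 10 + 1 : Nat) : Int) := by
    rw [PySem.Int.floordiv_eq_ediv_of_pos (by omega)]
    omega
  rw [hfd, PySem.List.pyRange_one]
  have htn : (((n.toNat / 10 + 1 : Nat) : Int) - 0).toNat = n.toNat / 10 + 1 := by omega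
  rw [htn, List.map_map]
  rw [zero_add]
  apply congrArg
  apply List.map_congr_left
  intro k hk
  have hk' : k < n.toNat / 10 + 1 := List.mem_range.mp hk
  have h10k : 10 * k ≤ n.toNat := by
    have h1 : k ≤ n.toNat / 10 := by omega
    have h2 := Nat.div_mul_le_self n.toNat 10
    calc 10 * k ≤ 10 * (n.toNat / 10) := by omega
      _ ≤ n.toNat := by omega
  have hr : n - 10 * ((0 : Int) + (k : Nat)) = ((n.toNat - 10 * k : Nat) : Int) := by
    omega
  simp only [Function.comp_apply, hr]
  rw [W35_eq]
  exact closed_cast (n.toNat - 10 * k)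

-- ===== VERDICT (by name: the statement is the Claim_ definition above) =====
theorem count_spec : Claim_equal_count := by
  intro n _ hpre
  unfold Spec_count
  rw [count_eq_W n hpre, count_alt_eq_W n hpre]
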